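-- pv_equiv track=rewrite | github.com/bobbigmac/actual-plays | scripts/build_site.py | _expand_category
-- ===== SOURCE A (Python) =====
-- def _expand_category(cat: str) -> list[str]:
--     """
--     Expand a category path like "ttrpgs/minor" into ["ttrpgs", "ttrpgs/minor"].
--     For flat categories, returns [cat].
--     """
--     raw = str(cat or "").strip().strip("/")
--     if not raw:
--         return []
--     parts = [p for p in raw.split("/") if p]
--     out: list[str] = []
--     for i in range(1, len(parts) + 1):
--         out.append("/".join(parts[:i]))
--     return out
-- ===== SOURCE B (Python) =====
-- def _expand_category(cat: str) -> list[str]: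
--     """
--     Expand a category path like "ttrpgs/minor" into ["ttrpgs", "ttrpgs/minor"].
--     For flat categories, returns [cat].
--     """
--     raw = str(cat or "").strip().strip("/")
--     if not raw:
--         return []
--     parts = [p for p in raw.split("/") if p]
--     if not parts:
--         return []
--     prefix = parts[0]
--     out = [prefix]
--     for p in parts[1:]:
--         prefix = prefix + "/" + p
--         out.append(prefix)
--     return out
-- ===== Notes on version B (the rewrite author's own statement) =====
-- stated objective: alternative
-- what changed: B replaces A's range loop that re-joins parts[:i] from scratch at every step with a single pass that extends one running prefix string and appends it to the output.
import Mathlib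
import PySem

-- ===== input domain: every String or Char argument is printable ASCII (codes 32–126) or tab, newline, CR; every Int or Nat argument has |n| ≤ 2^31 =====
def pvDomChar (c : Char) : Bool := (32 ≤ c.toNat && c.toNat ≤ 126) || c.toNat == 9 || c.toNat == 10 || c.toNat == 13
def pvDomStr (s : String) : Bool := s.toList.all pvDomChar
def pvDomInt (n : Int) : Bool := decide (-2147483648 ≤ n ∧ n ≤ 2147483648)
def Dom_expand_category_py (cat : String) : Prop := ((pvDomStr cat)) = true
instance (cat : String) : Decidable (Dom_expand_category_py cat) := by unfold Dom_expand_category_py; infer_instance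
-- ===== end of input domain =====

-- B builds the output with one running prefix string instead of re-joining parts[:i] at every i (alternative decomposition of the same expansion).

-- ===== PORT A =====
-- A: raw = str(cat or "").strip().strip("/"); if not raw: return []; parts = [p for p in raw.split("/") if p];
--    out = []; for i in range(1, len(parts)+1): out.append("/".join(parts[:i])); return out
def expand_category_py (cat : String) : List String :=
  let raw := PySem.Str.stripChars (PySem.Str.strip cat) "/"
  if raw = "" then []
  else
    let parts := ((PySem.Str.split? raw "/").getD []).filter (fun p => decide (p ≠ ""))
    (PySem.List.pyRange 1 ((parts.length : Int) + 1)).foldl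
      (fun out i => out ++ [PySem.Str.join "/" (PySem.List.slice parts none (some i))]) []

-- ===== PORT B =====
-- B: same raw/parts preamble; if not parts: return []; prefix = parts[0]; out = [prefix];
--    for p in parts[1:]: prefix = prefix + "/" + p; out.append(prefix); return out
def expand_category_py_alt (cat : String) : List String :=
  let raw := PySem.Str.stripChars (PySem.Str.strip cat) "/"
  if raw = "" then []
  else
    let parts := ((PySem.Str.split? raw "/").getD []).filter (fun p => decide (p ≠ ""))
    match parts with
    | [] => []
    | p :: ps =>
        (ps.foldl (fun st q => (st.1 ++ [st.2 ++ "/" ++ q], st.2 ++ "/" ++ q)) ([p], p)).1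

-- ===== PRECONDITION & SPEC =====
def Spec_expand_category_py (cat : String) (out : List String) : Prop := out = expand_category_py_alt cat
instance (cat : String) (out : List String) : Decidable (Spec_expand_category_py cat out) := by unfold Spec_expand_category_py; infer_instance

-- ===== CLAIM (what is proved, stated in full; the proofs are below) =====
def Claim_equal_expand_category_py : Prop := ∀ (cat : String), Dom_expand_category_py cat → Spec_expand_category_py cat (expand_category_py cat)

-- ===== LEMMAS AND PROOFS =====

theorem pv_foldB (ps acc : List String) (cur : String) :
    (ps.foldl (fun st q => (st.1 ++ [st.2 ++ "/" ++ q], st.2 ++ "/" ++ q)) (acc, cur)).1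
      = acc ++ (ps.foldl (fun st q => (st.1 ++ [st.2 ++ "/" ++ q], st.2 ++ "/" ++ q)) ([], cur)).1 := by
  induction ps generalizing acc cur with
  | nil => simp
  | cons q qs ih =>
      simp only [List.foldl_cons, List.nil_append]
      rw [ih (acc ++ [cur ++ "/" ++ q]) (cur ++ "/" ++ q), ih [cur ++ "/" ++ q] (cur ++ "/" ++ q)]
      simp

theorem pv_join_snoc (pref : List String) (q : String) (h : pref ≠ []) :
    PySem.Str.join "/" (pref ++ [q]) = PySem.Str.join "/" pref ++ "/" ++ q := by
  apply String.toList_inj.mp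
  simp only [PySem.Str.toList_join, String.toList_append, List.map_append, List.map_cons,
    List.map_nil]
  induction pref with
  | nil => exact absurd rfl h
  | cons a rest ih =>
      cases rest with
      | nil =>
          simp [PySem.Chars.join_cons_cons, PySem.Chars.join_singleton]
      | cons b rest' =>
          simp only [List.map_cons, List.cons_append, PySem.Chars.join_cons_cons]
          have ih' := ih (by simp)
          simp only [List.map_cons, List.cons_append] at ih'
          rw [ih']
          simp

theorem pv_join_one (p : String) : PySem.Str.join "/" [p] = p := by
  apply String.toList_inj.mp
  simp [PySem.Str.toList_join, PySem.Chars.join_singleton]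

theorem pv_pyRange_one (n : Nat) :
    PySem.List.pyRange 1 ((n : Int) + 1) = (List.range n).map (fun k => ((k + 1 : Nat) : Int)) := by
  induction n with
  | zero => decide
  | succ m ih =>
      have h : ((m + 1 : Nat) : Int) + 1 = ((m : Int) + 1) + 1 := by push_cast; ring
      rw [h, PySem.List.pyRange_one_succ_right (by omega), ih, List.range_succ, List.map_append]
      simp

theorem pv_cum (ps : List String) : ∀ (pref : List String), pref ≠ [] →
    (List.range ps.length).map (fun k => PySem.Str.join "/" (pref ++ List.take (k + 1) ps))
      = (ps.foldl (fun st q => (st.1 ++ [st.2 ++ "/" ++ q], st.2 ++ "/" ++ q))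
          ([], PySem.Str.join "/" pref)).1 := by
  induction ps with
  | nil => simp
  | cons q qs ih =>
      intro pref h
      rw [List.length_cons, List.range_succ_eq_map, List.map_cons, List.map_map, List.foldl_cons,
        pv_foldB]
      simp only [List.take_succ_cons, List.take_zero, List.nil_append]
      have hq : PySem.Str.join "/" pref ++ "/" ++ q = PySem.Str.join "/" (pref ++ [q]) :=
        (pv_join_snoc pref q h).symm
      rw [hq, ← ih (pref ++ [q]) (by simp)]
      refine congrArg₂ List.cons rfl ?_
      refine List.map_congr_left ?_
      intro k _
      simp only [Function.comp_apply]
      rw [show pref ++ q :: List.take (k + 1) qs = (pref ++ [q]) ++ List.take (k + 1) qs by simp]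

theorem pv_loops_eq (parts : List String) :
    (PySem.List.pyRange 1 ((parts.length : Int) + 1)).foldl
        (fun out i => out ++ [PySem.Str.join "/" (PySem.List.slice parts none (some i))]) []
      = (match parts with
         | [] => []
         | p :: ps =>
             (ps.foldl (fun st q => (st.1 ++ [st.2 ++ "/" ++ q], st.2 ++ "/" ++ q)) ([p], p)).1) := by
  rw [PySem.List.foldl_append_singleton_eq_map, pv_pyRange_one, List.map_map, List.nil_append]
  simp only [Function.comp_def, PySem.List.slice_to_natCast]
  cases parts with
  | nil => simp
  | cons p ps =>
      show _ = (ps.foldl (fun st q => (st.1 ++ [st.2 ++ "/" ++ q], st.2 ++ "/" ++ q)) ([p], p)).1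
      rw [List.length_cons, List.range_succ_eq_map, List.map_cons, List.map_map, pv_foldB]
      have h0 : PySem.Str.join "/" (List.take (0 + 1) (p :: ps)) = p := by
        simpa using pv_join_one p
      have ht : (List.range ps.length).map
          ((fun k => PySem.Str.join "/" (List.take (k + 1) (p :: ps))) ∘ Nat.succ)
            = (ps.foldl (fun st q => (st.1 ++ [st.2 ++ "/" ++ q], st.2 ++ "/" ++ q)) ([], p)).1 := by
        have hc := pv_cum ps [p] (by simp)
        rw [pv_join_one] at hc
        rw [← hc]
        refine List.map_congr_left ?_
        intro k _
        simp
      rw [h0, ht]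
      rfl

-- ===== VERDICT (by name: the statement is the Claim_ definition above) =====
theorem expand_category_py_spec : Claim_equal_expand_category_py := by
  intro cat _
  unfold Spec_expand_category_py expand_category_py expand_category_py_alt
  by_cases h : PySem.Str.stripChars (PySem.Str.strip cat) "/" = ""
  · simp only [h, if_true]
  · simp only [h, if_false]
    generalize ((PySem.Str.split? (PySem.Str.stripChars (PySem.Str.strip cat) "/") "/").getD []).filter (fun p => decide (p ≠ "")) = parts
    exact pv_loops_eq parts
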